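-- pv_equiv track=rewrite | github.com/daixd5520/TC | data/generate_trec_cot.py | get_processed_count
-- ===== SOURCE A (Python) =====
-- def get_processed_count(original_data, processed_data):
--     """获取已处理的数据数量"""
--     if not processed_data:
--         return 0
--
--     processed_texts = {item['text'] for item in processed_data}
--     count = 0
--
--     for item in original_data:
--         if item.get('text') in processed_texts:
--             count += 1
--
--     return count
-- ===== SOURCE B (Python) =====
-- def get_processed_count(original_data, processed_data):
--     counts = {}
--     for item in original_data:
--         t = item.get('text')
--         counts[t] = counts.get(t, 0) + 1
--     processed_texts = {item['text'] for item in processed_data}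
--     return sum(counts.get(t, 0) for t in processed_texts)
-- ===== Notes on version B (the rewrite author's own statement) =====
-- stated objective: alternative
-- what changed: Instead of scanning original_data and testing each text against the processed set, B builds a counter (text -> multiplicity) over original_data in one pass and then sums the multiplicities of the distinct processed texts, so the membership-test loop over original items disappears.
import Mathlib
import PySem

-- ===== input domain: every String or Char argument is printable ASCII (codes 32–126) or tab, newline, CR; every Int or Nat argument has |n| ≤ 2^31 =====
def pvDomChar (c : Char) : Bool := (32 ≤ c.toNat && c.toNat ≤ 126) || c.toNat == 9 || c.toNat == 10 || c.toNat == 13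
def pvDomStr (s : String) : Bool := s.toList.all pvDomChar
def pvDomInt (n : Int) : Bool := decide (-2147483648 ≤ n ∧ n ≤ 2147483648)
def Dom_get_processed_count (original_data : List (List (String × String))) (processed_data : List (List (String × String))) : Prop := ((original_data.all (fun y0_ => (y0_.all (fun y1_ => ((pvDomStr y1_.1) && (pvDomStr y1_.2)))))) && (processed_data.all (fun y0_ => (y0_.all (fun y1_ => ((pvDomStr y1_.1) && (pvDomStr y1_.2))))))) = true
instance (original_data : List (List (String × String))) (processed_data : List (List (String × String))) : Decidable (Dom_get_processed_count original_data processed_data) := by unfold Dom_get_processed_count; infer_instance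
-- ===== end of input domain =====

-- B replaces A's membership-test loop over original_data by a counter over original texts
-- summed over the distinct processed texts (alternative decomposition, same cost).

-- ===== PORT A =====
def get_processed_count (original_data : List (List (String × String))) (processed_data : List (List (String × String))) : Int :=
  if processed_data = [] then 0
  else
    let processed_texts : PySem.Set (Option String) :=
      PySem.Set.ofList (processed_data.map (fun item => (PySem.Dict.ofList item).get? "text"))
    original_data.foldl
      (fun count item =>
        if processed_texts.contains ((PySem.Dict.ofList item).get? "text") then count + 1 else count)
      0

-- ===== PORT B =====
def get_processed_count_alt (original_data : List (List (String × String))) (processed_data : List (List (String × String))) : Int :=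
  let counts : PySem.Dict (Option String) Int :=
    original_data.foldl
      (fun d item => d.modify ((PySem.Dict.ofList item).get? "text") 0 (· + 1))
      PySem.Dict.empty
  let processed_texts : PySem.Set (Option String) :=
    PySem.Set.ofList (processed_data.map (fun item => (PySem.Dict.ofList item).get? "text"))
  processed_texts.foldl (fun s t => s + counts.getD t 0) 0

-- ===== PRECONDITION & SPEC =====
-- Pre_ excludes exactly the inputs where Python A raises KeyError: a processed item without a 'text' key.
def Pre_get_processed_count (original_data : List (List (String × String))) (processed_data : List (List (String × String))) : Prop :=
  ∀ item ∈ processed_data, item.any (fun p => p.1 == "text") = true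

instance (original_data : List (List (String × String))) (processed_data : List (List (String × String))) : Decidable (Pre_get_processed_count original_data processed_data) := by unfold Pre_get_processed_count; infer_instance

def pvWitness_get_processed_count : (List (List (String × String))) × (List (List (String × String))) :=
  ([[("text", "a")], [("text", "b")]], [[("text", "a")]])

def Spec_get_processed_count (original_data : List (List (String × String))) (processed_data : List (List (String × String))) (out : Int) : Prop := out = get_processed_count_alt original_data processed_data
instance (original_data : List (List (String × String))) (processed_data : List (List (String × String))) (out : Int) : Decidable (Spec_get_processed_count original_data processed_data out) := by unfold Spec_get_processed_count; infer_instance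

-- ===== CLAIM (what is proved, stated in full; the proofs are below) =====
def Claim_equal_get_processed_count : Prop := ∀ (original_data : List (List (String × String))) (processed_data : List (List (String × String))), Dom_get_processed_count original_data processed_data → Pre_get_processed_count original_data processed_data → Spec_get_processed_count original_data processed_data (get_processed_count original_data processed_data)

-- ===== LEMMAS AND PROOFS =====

-- countP of a disjunction of pointwise-exclusive tests splits into a sum
lemma pv_countP_or_disj {α : Type} (xs : List α) (p q : α → Bool)
    (h : ∀ x, p x = true → q x = false) :
    xs.countP (fun x => p x || q x) = xs.countP p + xs.countP q := by
  induction xs with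
  | nil => simp
  | cons x xs ih =>
    rw [List.countP_cons, List.countP_cons, List.countP_cons, ih]
    cases hpx : p x
    · simp
      omega
    · simp [h x hpx]
      omega

-- summing the multiplicities over a duplicate-free list of keys counts the members
lemma pv_sum_count_eq_countP (xs : List (Option String)) (s : List (Option String))
    (hs : s.Nodup) :
    (s.map (fun t => (xs.count t : Int))).sum = (xs.countP (fun x => s.contains x) : Int) := by
  induction s with
  | nil =>
    have hmt : (fun x : Option String => ([] : List (Option String)).contains x) = fun _ => false := by
      funext x; rfl
    rw [hmt]; simp
  | cons t s ih =>
    rw [List.nodup_cons] at hs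
    have hsplit : xs.countP (fun x => (t :: s).contains x)
        = xs.countP (fun x => x == t) + xs.countP (fun x => s.contains x) := by
      have : (fun x => (t :: s).contains x) = (fun x => (x == t) || s.contains x) := by
        funext x; by_cases hxt : x = t <;> simp [hxt]
      rw [this]
      apply pv_countP_or_disj
      intro x hx
      have : x = t := by simpa using hx
      subst this
      simpa using hs.1
    rw [List.map_cons, List.sum_cons, ih hs.2, hsplit]
    have : xs.count t = xs.countP (fun x => x == t) := by
      simp [List.count_eq_countP]
    rw [this]
    push_cast
    ring

-- ===== VERDICT (by name: the statement is the Claim_ definition above) =====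
theorem get_processed_count_spec : Claim_equal_get_processed_count := by
  intro original_data processed_data _ _
  unfold Spec_get_processed_count get_processed_count get_processed_count_alt
  set f : List (String × String) → Option String := fun item => (PySem.Dict.ofList item).get? "text" with hf
  set pts : PySem.Set (Option String) := PySem.Set.ofList (processed_data.map f) with hpts
  have hcounts :
      original_data.foldl (fun d item => d.modify (f item) 0 (· + 1)) PySem.Dict.empty
        = PySem.Dict.counter (original_data.map f) := by
    rw [PySem.Dict.counter_eq_foldl, List.foldl_map]
  have hB :
      pts.foldl (fun s t => s + (original_data.foldl (fun d item => d.modify (f item) 0 (· + 1)) PySem.Dict.empty).getD t 0) 0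
        = ((original_data.map f).countP (fun x => pts.contains x) : Int) := by
    rw [hcounts, PySem.List.foldl_add]
    have : (fun t => (PySem.Dict.counter (original_data.map f)).getD t 0)
        = fun t => ((original_data.map f).count t : Int) := by
      funext t; exact PySem.Dict.getD_counter _ _
    rw [this, pv_sum_count_eq_countP _ _ (PySem.Set.nodup_ofList _), zero_add]
    rfl
  have hA :
      original_data.foldl (fun count item => if pts.contains (f item) then count + 1 else count) 0
        = ((original_data.map f).countP (fun x => pts.contains x) : Int) := by
    have h1 := PySem.List.foldl_if_add_one (fun x => pts.contains x) (original_data.map f) 0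
    rw [List.foldl_map] at h1
    simpa using h1
  by_cases hp : processed_data = []
  · subst hp
    have hnil : pts = [] := rfl
    rw [if_pos rfl, hnil]
    rfl
  · simp only [if_neg hp]
    exact hA.trans hB.symm
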